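-- pv_equiv track=rewrite | github.com/prasojojiwandono/logic | zirconium2019(codility challenge).py | solution
-- ===== SOURCE A (Python) =====
-- def solution(A, B, F):
-- 	# write your code in Python 3.6
-- 	C=[]
-- 	for i in range(len(A)):
-- 		C.append(A[i]-B[i])
-- 	D=[]
-- 	v=0
-- 	N = C.copy()
-- 	x = [A,B,N]
-- 	C.sort(reverse = True)
--
-- 	for i in range(F):
-- 		u = x[2].index(C[i])
-- 		v=v+x[0][u]
--
-- 		for t in range(3):
-- 			del x[t][u]
--
-- 	for i in x[1]:
-- 		v = v+i
--
-- 	return v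
-- ===== SOURCE B (Python) =====
-- def solution(A, B, F):
--     diffs = sorted((a - b for a, b in zip(A, B)), reverse=True)
--     return sum(B) + sum(diffs[:max(F, 0)])
-- ===== Notes on version B (the rewrite author's own statement) =====
-- stated objective: faster
-- what changed: B replaces A's select-and-delete loop (F passes, each doing a linear list.index plus three deletions) by the identity answer = sum(B) + sum of the F largest A[i]-B[i] differences: one sort and a prefix sum.
-- outside the precondition, e.g. on solution([1], [2, 9], 2): A raises IndexError, B returns 10; on solution([1, 2], [3], 1): A raises IndexError, B returns 1
import Mathlib
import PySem

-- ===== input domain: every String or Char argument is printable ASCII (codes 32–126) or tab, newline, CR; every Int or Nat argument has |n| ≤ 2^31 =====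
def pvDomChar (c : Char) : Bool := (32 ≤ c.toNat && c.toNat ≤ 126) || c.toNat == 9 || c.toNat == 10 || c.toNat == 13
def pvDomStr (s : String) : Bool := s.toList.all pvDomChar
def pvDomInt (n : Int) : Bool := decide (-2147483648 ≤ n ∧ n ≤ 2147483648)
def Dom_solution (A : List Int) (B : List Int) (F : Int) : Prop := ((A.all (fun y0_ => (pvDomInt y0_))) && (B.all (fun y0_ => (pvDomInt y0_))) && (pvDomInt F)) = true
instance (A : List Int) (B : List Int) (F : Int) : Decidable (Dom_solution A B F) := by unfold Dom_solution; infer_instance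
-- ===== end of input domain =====

-- B replaces A's O(F*N) select-and-delete loop by the identity
-- answer = sum(B) + sum of the F largest diffs (sort once, take a prefix).
-- Note: Python A mutates its arguments A and B in place (del); B does not —
-- the equivalence proved here is about the RETURN value only.

-- ===== PORT A =====
def solution (A : List Int) (B : List Int) (F : Int) : Int :=
  -- C = []; for i in range(len(A)): C.append(A[i]-B[i])
  let C := (List.range A.length).foldl
    (fun c (i : Nat) => c ++ [PySem.List.pyGetD A (i : Int) 0 - PySem.List.pyGetD B (i : Int) 0]) []
  -- N = C.copy(); x = [A,B,N]; C.sort(reverse=True)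
  let N := C
  let Cs := PySem.List.sorted C (fun x => x) true
  -- for i in range(F): u = x[2].index(C[i]); v += x[0][u]; del x[t][u] for t in 0..2
  let fin := (PySem.List.pyRange 0 F 1).foldl
    (fun (st : List Int × List Int × List Int × Int) i =>
      let u := ((PySem.List.index? st.2.2.1 (PySem.List.pyGetD Cs i 0)).getD 0)
      (st.1.eraseIdx u, st.2.1.eraseIdx u, st.2.2.1.eraseIdx u,
        st.2.2.2 + PySem.List.pyGetD st.1 (u : Int) 0))
    (A, B, N, 0)
  -- for i in x[1]: v += i
  fin.2.1.foldl (fun v i => v + i) fin.2.2.2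

-- ===== PORT B =====
def solution_alt (A : List Int) (B : List Int) (F : Int) : Int :=
  let diffs := PySem.List.sorted ((A.zip B).map (fun p => p.1 - p.2)) (fun x => x) true
  B.sum + (PySem.List.slice diffs none (some (max F 0))).sum

-- ===== PRECONDITION & SPEC =====
-- Pre_ excludes exactly the inputs where Python A raises an IndexError:
-- F > len(A) (C[i] out of range) or len(B) < len(A) (B[i] out of range).
def Pre_solution (A : List Int) (B : List Int) (F : Int) : Prop :=
  F ≤ (A.length : Int) ∧ A.length ≤ B.length
instance (A : List Int) (B : List Int) (F : Int) : Decidable (Pre_solution A B F) := by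
  unfold Pre_solution; infer_instance

def pvWitness_solution : List Int × List Int × Int := ([4, 1, 2], [2, 5, 1], 2)

def Spec_solution (A : List Int) (B : List Int) (F : Int) (out : Int) : Prop := out = solution_alt A B F
instance (A : List Int) (B : List Int) (F : Int) (out : Int) : Decidable (Spec_solution A B F out) := by unfold Spec_solution; infer_instance

-- ===== CLAIM (what is proved, stated in full; the proofs are below) =====
def Claim_equal_solution : Prop := ∀ (A : List Int) (B : List Int) (F : Int), Dom_solution A B F → Pre_solution A B F → Spec_solution A B F (solution A B F)

-- ===== LEMMAS AND PROOFS =====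

theorem zipWith_eraseIdx {f : Int → Int → Int} (xs ys : List Int) (u : Nat) :
    List.zipWith f (xs.eraseIdx u) (ys.eraseIdx u) = (List.zipWith f xs ys).eraseIdx u := by
  induction xs generalizing ys u with
  | nil => simp
  | cons a xs ih =>
    cases ys with
    | nil => simp
    | cons b ys =>
      cases u with
      | zero => simp
      | succ u => simpa using ih ys u

theorem sum_eraseIdx (xs : List Int) (u : Nat) (hu : u < xs.length) :
    (xs.eraseIdx u).sum = xs.sum - xs[u] := by
  induction xs generalizing u with
  | nil => simp at hu
  | cons a xs ih =>
    cases u with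
    | zero => simp
    | succ u =>
      simp only [List.eraseIdx_cons_succ, List.sum_cons, List.getElem_cons_succ]
      rw [ih u (by simpa using hu)]
      ring

theorem eraseIdx_index?_eq_erase (xs : List Int) (c : Int) (hc : c ∈ xs) :
    xs.eraseIdx ((PySem.List.index? xs c).getD 0) = xs.erase c := by
  induction xs with
  | nil => simp at hc
  | cons a xs ih =>
    by_cases h : a = c
    · subst h
      rw [PySem.List.index?_cons_self]
      simp
    · rw [PySem.List.index?_cons_of_ne xs h]
      have hc' : c ∈ xs := by
        rcases List.mem_cons.mp hc with h1 | h1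
        · exact absurd h1.symm h
        · exact h1
      have hsome := (PySem.List.index?_isSome_iff xs c).mpr hc'
      obtain ⟨k, hk⟩ := Option.isSome_iff_exists.mp hsome
      rw [hk]
      simp only [Option.map_some, Option.getD_some, List.eraseIdx_cons_succ]
      rw [List.erase_cons_tail (by simp [h])]
      have := ih hc'
      rw [hk] at this
      simp only [Option.getD_some] at this
      rw [this]

theorem zip_map_sub (xs ys : List Int) :
    (xs.zip ys).map (fun p => p.1 - p.2) = List.zipWith (fun a b => a - b) xs ys := by
  induction xs generalizing ys with
  | nil => simp
  | cons a xs ih => cases ys <;> simp [ih]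

theorem map_range_sub (A B : List Int) (h : A.length ≤ B.length) :
    (List.range A.length).map
        (fun (i : Nat) => PySem.List.pyGetD A (i : Int) 0 - PySem.List.pyGetD B (i : Int) 0)
      = List.zipWith (fun a b => a - b) A B := by
  apply List.ext_getElem
  · simp [Nat.min_eq_left h]
  · intro i hi1 hi2
    simp only [List.getElem_map, List.getElem_range, List.getElem_zipWith]
    have hiA : i < A.length := by simpa using hi1
    rw [PySem.List.pyGetD_eq_getElem A 0 (Int.natCast_nonneg _) (by exact_mod_cast hiA),
        PySem.List.pyGetD_eq_getElem B 0 (Int.natCast_nonneg _) (by exact_mod_cast (lt_of_lt_of_le hiA h))]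
    simp

theorem loopA_inv (Cs : List Int) (m : Nat) : ∀ (j : Nat) (xA xB xN : List Int) (v : Int),
    j + m ≤ Cs.length →
    xN = List.zipWith (fun a b => a - b) xA xB →
    xA.length ≤ xB.length →
    xN.Perm (Cs.drop j) →
    (let fin := (List.range' j m).foldl
        (fun (st : List Int × List Int × List Int × Int) (i : Nat) =>
          let u := ((PySem.List.index? st.2.2.1 (PySem.List.pyGetD Cs ((0 : Int) + (i : Int)) 0)).getD 0)
          (st.1.eraseIdx u, st.2.1.eraseIdx u, st.2.2.1.eraseIdx u,
            st.2.2.2 + PySem.List.pyGetD st.1 (u : Int) 0)) (xA, xB, xN, v)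
     fin.2.2.2 + fin.2.1.sum = v + xB.sum + ((Cs.drop j).take m).sum) := by
  induction m with
  | zero => intro j xA xB xN v hjm h1 h2 h4; simp
  | succ m ih =>
    intro j xA xB xN v hjm h1 h2 h4
    have hj : j < Cs.length := by omega
    have hlenN : xN.length = xA.length := by
      rw [h1]; simp [Nat.min_eq_left h2]
    -- the value picked this round
    have hc : PySem.List.pyGetD Cs ((0 : Int) + (j : Int)) 0 = Cs[j] := by
      rw [zero_add, PySem.List.pyGetD_eq_getElem Cs 0 (Int.natCast_nonneg _) (by exact_mod_cast hj)]
      simp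
    have hdropj : Cs[j] :: Cs.drop (j + 1) = Cs.drop j := List.getElem_cons_drop ..
    have hmem : Cs[j] ∈ xN := by
      rw [h4.mem_iff, ← hdropj]; exact List.mem_cons_self
    obtain ⟨u, hu⟩ := Option.isSome_iff_exists.mp ((PySem.List.index?_isSome_iff xN Cs[j]).mpr hmem)
    obtain ⟨huN, huval, _⟩ := PySem.List.getElem_of_index?_eq_some hu
    have huA : u < xA.length := by omega
    have huB : u < xB.length := by omega
    -- advance one step
    rw [List.range'_succ, List.foldl_cons]
    simp only [hc, hu, Option.getD_some]
    have hv : PySem.List.pyGetD xA (u : Int) 0 = xA[u] := by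
      rw [PySem.List.pyGetD_eq_getElem xA 0 (Int.natCast_nonneg _) (by exact_mod_cast huA)]
      simp
    rw [hv]
    have herase : xN.eraseIdx u = xN.erase Cs[j] := by
      have := eraseIdx_index?_eq_erase xN Cs[j] hmem
      rwa [hu, Option.getD_some] at this
    have hstep := ih (j + 1) (xA.eraseIdx u) (xB.eraseIdx u) (xN.eraseIdx u)
      (v + xA[u]) (by omega)
      (by rw [h1, zipWith_eraseIdx])
      (by rw [List.length_eraseIdx_of_lt huA, List.length_eraseIdx_of_lt huB]; omega)
      (by
        rw [herase]
        have := h4.erase Cs[j]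
        rwa [← hdropj, List.erase_cons_head] at this)
    rw [hstep]
    have hsumB : (xB.eraseIdx u).sum = xB.sum - xB[u] := sum_eraseIdx xB u huB
    have hNu : xN[u]'huN = xA[u] - xB[u] := by
      subst h1; simp
    have htake : ((Cs.drop j).take (m + 1)).sum = Cs[j] + ((Cs.drop (j + 1)).take m).sum := by
      rw [← hdropj, List.take_succ_cons, List.sum_cons]
    rw [hsumB, htake]
    have : Cs[j] = xA[u] - xB[u] := by rw [← huval, hNu]
    rw [this]; ring

-- ===== VERDICT (by name: the statement is the Claim_ definition above) =====
theorem solution_spec : Claim_equal_solution := by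
  intro A B F _hdom hpre
  obtain ⟨hF, hAB⟩ := hpre
  unfold Spec_solution
  simp only [solution, solution_alt]
  rw [PySem.List.foldl_append_singleton_eq_map, List.nil_append, map_range_sub A B hAB,
      zip_map_sub]
  set Cs := PySem.List.sorted (List.zipWith (fun a b => a - b) A B) (fun x : Int => x) true with hCs
  have hlenCs : Cs.length = A.length := by
    rw [hCs, PySem.List.length_sorted]; simp [Nat.min_eq_left hAB]
  rw [PySem.List.pyRange_one, sub_zero, List.foldl_map]
  have hFA : F.toNat ≤ A.length := by omega
  have hinv := loopA_inv Cs F.toNat 0 A B (List.zipWith (fun a b => a - b) A B) 0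
    (by omega) rfl hAB (by rw [List.drop_zero, hCs]; exact (PySem.List.sorted_perm (List.zipWith (fun a b => a - b) A B) (fun x : Int => x) true).symm)
  rw [← List.range_eq_range'] at hinv
  simp only [List.drop_zero] at hinv
  have hfold :
      ∀ (xs : List Int) (a : Int), xs.foldl (fun v i => v + i) a = a + xs.sum := by
    intro xs a
    have := PySem.List.foldl_add xs (fun x => x) a
    simpa using this
  rw [hfold]
  rw [hinv]
  have hmax : (max F 0).toNat = F.toNat := by omega
  rw [PySem.List.slice_to _ (le_max_right F 0), hmax]
  ring
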